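-- pv_equiv track=rewrite | github.com/Morihaojie/EPtrans-kit | eptransk/hdf5editor.py | find_translation_vectors
-- ===== SOURCE A (Python) =====
-- def find_translation_vectors(repeat_times):
--     ni = repeat_times[0]
--     nj = repeat_times[1]
--     nk = repeat_times[2]
--     translation_vectors=[]
--     for i in range(int(ni)):
--         for j in range(int(nj)):
--             for k in range(int(nk)):
--                 if ni-1 > 0:
--                     ii =  i-1
--                 else:
--                     ii = i
--                 if nj-1 > 0:
--                     jj =  j-1
--                 else:
--                     jj = j
--                 if nk-1 > 0:
--                     kk =  k-1
--                 else:
--                     kk = k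
--                 translation_vectors.append([ii, jj, kk])
--     return translation_vectors
-- ===== SOURCE B (Python) =====
-- def find_translation_vectors(repeat_times):
--     ni, nj, nk = repeat_times[0], repeat_times[1], repeat_times[2]
--     di, dj, dk = int(ni), int(nj), int(nk)
--     if di <= 0 or dj <= 0 or dk <= 0:
--         return []
--     si = 1 if ni > 1 else 0
--     sj = 1 if nj > 1 else 0
--     sk = 1 if nk > 1 else 0
--     out = []
--     for m in range(di * dj * dk):
--         i, r = divmod(m, dj * dk)
--         j, k = divmod(r, dk)
--         out.append([i - si, j - sj, k - sk])
--     return out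
-- ===== Notes on version B (the rewrite author's own statement) =====
-- stated objective: alternative
-- what changed: B replaces A's triple-nested loop by a single loop over the flat cell index 0..ni*nj*nk-1, decoding each flat index into (i,j,k) with two divmods (mixed-radix decoding) and subtracting a precomputed per-axis shift.
import Mathlib
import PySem

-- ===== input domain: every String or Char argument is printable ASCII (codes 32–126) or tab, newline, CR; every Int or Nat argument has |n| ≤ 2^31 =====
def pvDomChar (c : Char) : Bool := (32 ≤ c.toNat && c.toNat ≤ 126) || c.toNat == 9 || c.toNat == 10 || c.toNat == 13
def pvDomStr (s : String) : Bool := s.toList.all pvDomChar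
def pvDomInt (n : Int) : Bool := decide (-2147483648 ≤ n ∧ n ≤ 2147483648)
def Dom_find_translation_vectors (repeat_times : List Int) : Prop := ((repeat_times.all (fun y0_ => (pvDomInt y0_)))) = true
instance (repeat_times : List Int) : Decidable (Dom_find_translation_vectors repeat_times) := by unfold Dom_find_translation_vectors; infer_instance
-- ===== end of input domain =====

-- B replaces A's triple-nested loop by a single loop over the flat cell index,
-- decoded into (i,j,k) by two divmods with precomputed per-axis shifts; objective: alternative.
-- ===== PORT A =====
def find_translation_vectors (repeat_times : List Int) : List (List Int) :=
  match PySem.List.pyGet? repeat_times 0, PySem.List.pyGet? repeat_times 1,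
        PySem.List.pyGet? repeat_times 2 with
  | some ni, some nj, some nk =>
      (PySem.List.pyRange 0 ni 1).foldl (fun acc i =>
        (PySem.List.pyRange 0 nj 1).foldl (fun acc j =>
          (PySem.List.pyRange 0 nk 1).foldl (fun acc k =>
            acc ++ [[(if ni - 1 > 0 then i - 1 else i),
                     (if nj - 1 > 0 then j - 1 else j),
                     (if nk - 1 > 0 then k - 1 else k)]]) acc) acc) []
  | _, _, _ => []   -- IndexError: outside Pre_

-- ===== PORT B =====
def find_translation_vectors_alt (repeat_times : List Int) : List (List Int) :=
  (((PySem.List.pyGet? repeat_times 0).bind fun ni =>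
    (PySem.List.pyGet? repeat_times 1).bind fun nj =>
    (PySem.List.pyGet? repeat_times 2).map fun nk =>
      if ni ≤ 0 ∨ nj ≤ 0 ∨ nk ≤ 0 then []
      else
        let si : Int := if ni > 1 then 1 else 0
        let sj : Int := if nj > 1 then 1 else 0
        let sk : Int := if nk > 1 then 1 else 0
        (PySem.List.pyRange 0 (ni * nj * nk) 1).map (fun m =>
          let i := PySem.Int.floordiv m (nj * nk)
          let r := PySem.Int.mod m (nj * nk)
          let j := PySem.Int.floordiv r nk
          let k := PySem.Int.mod r nk
          [i - si, j - sj, k - sk])) : Option (List (List Int))).getD []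
  -- a 'none' from an indexing is IndexError, outside Pre_

-- ===== PRECONDITION & SPEC =====
-- Pre_: A indexes the first three elements; with fewer than three it raises IndexError.
def Pre_find_translation_vectors (repeat_times : List Int) : Prop :=
  3 ≤ repeat_times.length
instance (repeat_times : List Int) : Decidable (Pre_find_translation_vectors repeat_times) := by
  unfold Pre_find_translation_vectors; infer_instance
def pvWitness_find_translation_vectors : List Int := [2, 3, 1]

def Spec_find_translation_vectors (repeat_times : List Int) (out : List (List Int)) : Prop := out = find_translation_vectors_alt repeat_times
instance (repeat_times : List Int) (out : List (List Int)) : Decidable (Spec_find_translation_vectors repeat_times out) := by unfold Spec_find_translation_vectors; infer_instance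

-- ===== CLAIM =====
def Claim_equal_find_translation_vectors : Prop := ∀ (repeat_times : List Int), Dom_find_translation_vectors repeat_times → Pre_find_translation_vectors repeat_times → Spec_find_translation_vectors repeat_times (find_translation_vectors repeat_times)

-- ===== LEMMAS AND PROOFS =====

-- the shift rewrite: A decides the shift per cell, B per axis
theorem pvShift_eq (n i : Int) :
    (if n - 1 > 0 then i - 1 else i) = i - (if n > 1 then 1 else 0) := by
  split_ifs <;> omega

-- mixed-radix decoding over Nat: one flat scan of range (A*B) equals the nested product
theorem pvRangeMulDecode {α : Type} (A B : Nat) (f : Nat → Nat → α) :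
    (List.range (A * B)).map (fun m => f (m / B) (m % B)) =
      (List.range A).flatMap (fun i => (List.range B).map (fun j => f i j)) := by
  induction A with
  | zero => simp
  | succ A ih =>
      rw [Nat.succ_mul, List.range_add, List.map_append, ih, List.range_succ,
        List.flatMap_append]
      simp only [List.map_map, List.flatMap_cons, List.flatMap_nil, List.append_nil]
      congr 1
      apply List.map_congr_left
      intro j hj
      have hjB : j < B := List.mem_range.mp hj
      simp only [Function.comp]
      have h1 : (A * B + j) / B = A := by
        rw [Nat.add_comm, Nat.mul_comm, Nat.add_mul_div_left _ _ (by omega : 0 < B),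
          Nat.div_eq_of_lt hjB, Nat.zero_add]
      have h2 : (A * B + j) % B = j := by
        rw [Nat.mul_comm, Nat.mul_add_mod, Nat.mod_eq_of_lt hjB]
      rw [h1, h2]

-- the same fact over Int ranges with Python floordiv/mod, for positive radix
theorem pvPyRangeMulDecode {α : Type} (a b : Int) (ha : 0 ≤ a) (hb : 0 < b)
    (f : Int → Int → α) :
    (PySem.List.pyRange 0 (a * b) 1).map
        (fun m => f (PySem.Int.floordiv m b) (PySem.Int.mod m b)) =
      (PySem.List.pyRange 0 a 1).flatMap
        (fun i => (PySem.List.pyRange 0 b 1).map (fun j => f i j)) := by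
  rw [PySem.List.pyRange_one, PySem.List.pyRange_one, PySem.List.pyRange_one]
  have hab : (a * b - 0).toNat = (a - 0).toNat * (b - 0).toNat := by
    simp only [Int.sub_zero]
    rw [← Int.toNat_mul ha (le_of_lt hb)]
  rw [hab]
  have hbcast : ((b - 0).toNat : Int) = b := by omega
  simp only [List.map_map, List.flatMap_map, Function.comp_def, Int.zero_add]
  rw [← hbcast]
  simp only [PySem.Int.floordiv_natCast, PySem.Int.mod_natCast]
  exact pvRangeMulDecode _ _ (fun i j => f (i : Int) (j : Int))

-- the triple decode: one flat scan equals A's nested product shape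
theorem pvDecode3 (a b c si sj sk : Int) (ha : 0 < a) (hb : 0 < b) (hc : 0 < c) :
    (PySem.List.pyRange 0 (a * b * c) 1).map (fun m =>
        [PySem.Int.floordiv m (b * c) - si,
         PySem.Int.floordiv (PySem.Int.mod m (b * c)) c - sj,
         PySem.Int.mod (PySem.Int.mod m (b * c)) c - sk]) =
      (PySem.List.pyRange 0 a 1).flatMap (fun i =>
        (PySem.List.pyRange 0 b 1).flatMap (fun j =>
          (PySem.List.pyRange 0 c 1).map (fun k => [i - si, j - sj, k - sk]))) := by
  have h1 := pvPyRangeMulDecode a (b * c) (le_of_lt ha) (mul_pos hb hc)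
    (fun i r => [i - si, PySem.Int.floordiv r c - sj, PySem.Int.mod r c - sk])
  simp only [] at h1
  rw [mul_assoc, h1]
  congr 1
  funext i
  have h2 := pvPyRangeMulDecode b c (le_of_lt hb) hc
    (fun j k => [i - si, j - sj, k - sk])
  simp only [] at h2
  rw [h2]

-- ===== VERDICT =====
theorem find_translation_vectors_spec : Claim_equal_find_translation_vectors := by
  intro rt _ _
  unfold Spec_find_translation_vectors find_translation_vectors find_translation_vectors_alt
  cases h0 : PySem.List.pyGet? rt 0 <;> cases h1 : PySem.List.pyGet? rt 1 <;>
    cases h2 : PySem.List.pyGet? rt 2 <;> simp only [Option.bind, Option.map, Option.getD]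
  rename_i ni nj nk
  simp only [PySem.List.foldl_append_singleton_eq_map, PySem.List.foldl_append_eq_flatMap,
    List.nil_append, pvShift_eq]
  by_cases hd : ni ≤ 0 ∨ nj ≤ 0 ∨ nk ≤ 0
  · rw [if_pos hd]
    rcases hd with h | h | h <;> simp [PySem.List.pyRange_one_eq_nil h]
  · rw [if_neg hd]
    push Not at hd
    obtain ⟨hi, hj, hk⟩ := hd
    exact (pvDecode3 ni nj nk _ _ _ hi hj hk).symm
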